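-- pv_equiv track=rewrite | github.com/sharvenp/Top-Down-Shooter | src/utils.py | get_raycast_blocks
-- ===== SOURCE A (Python) =====
-- def get_raycast_blocks(x0, y0, x1, y1):
--
--     # Bresenham's line algorithm
--
--     blocks = []
--
--     s = abs(x1 - x0) < abs(y1 - y0)
--     if s:
--         x0, y0 = y0, x0
--         x1, y1 = y1, x1
--
--     if x0 > x1:
--         x0, x1 = x1, x0
--         y0, y1 = y1, y0
--
--     dx = x1 - x0
--     dy = abs(y1 - y0)
--     e = 0
--     ystep = 0
--     if y1 != y0:
--         ystep = (y1 - y0)//abs(y1 - y0)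
--     y = y0
--
--     for x in range(x0, x1):
--         if s:
--             blocks.append((y, x));
--         else:
--             blocks.append((x, y));
--
--         e += dy;
--         if dx <= 2*e:
--             y += ystep
--             e -= dx
--
--     return blocks
-- ===== SOURCE B (Python) =====
-- def _march(a0, b0, a1, b1):
--     # cells along the major axis a, minor coordinate in closed form
--     if a0 > a1:
--         a0, b0, a1, b1 = a1, b1, a0, b0
--     da = a1 - a0
--     db = abs(b1 - b0)
--     sb = (b1 > b0) - (b1 < b0)
--     return [(a0 + k, b0 + sb * ((2 * k * db + da) // (2 * da))) for k in range(da)]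
--
-- def get_raycast_blocks(x0, y0, x1, y1):
--     # march along the steeper axis, then flip pairs back if it was y
--     if abs(x1 - x0) < abs(y1 - y0):
--         return [(c, m) for (m, c) in _march(y0, x0, y1, x1)]
--     return _march(x0, y0, x1, y1)
-- ===== Notes on version B (the rewrite author's own statement) =====
-- stated objective: alternative
-- what changed: Replaces Bresenham's single stateful loop (running error accumulator updated and thresholded each step) with staged passes: a helper marches the major axis computing each minor coordinate from the closed-form (2k*db+da)//(2da), and a second pass flips the pairs when the steep axis was chosen.
import Mathlib
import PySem

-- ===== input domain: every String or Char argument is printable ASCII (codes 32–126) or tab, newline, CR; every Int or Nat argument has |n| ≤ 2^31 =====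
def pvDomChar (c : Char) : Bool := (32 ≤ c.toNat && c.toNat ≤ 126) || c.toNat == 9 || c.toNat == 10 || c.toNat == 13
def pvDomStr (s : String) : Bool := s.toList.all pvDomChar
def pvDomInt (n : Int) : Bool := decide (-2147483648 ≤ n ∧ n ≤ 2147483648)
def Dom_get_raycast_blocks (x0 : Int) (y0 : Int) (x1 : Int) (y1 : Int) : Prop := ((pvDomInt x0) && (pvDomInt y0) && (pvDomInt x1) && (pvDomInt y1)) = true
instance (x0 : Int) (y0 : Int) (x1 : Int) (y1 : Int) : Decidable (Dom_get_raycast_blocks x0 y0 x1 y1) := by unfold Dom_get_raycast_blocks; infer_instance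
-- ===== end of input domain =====

-- B replaces A's stateful error-accumulator loop with staged passes: a major-axis
-- march with a closed-form minor coordinate, then a pair-flip pass; same cost.

-- ===== PORT A =====
-- loop body of A's 'for x in range(x0, x1)': append cell, bump error, maybe step y
def pvStepA (s : Bool) (dx dy ystep : Int) (st : List (Int × Int) × Int × Int) (x : Int) :
    List (Int × Int) × Int × Int :=
  let blocks := st.1 ++ [if s then (st.2.1, x) else (x, st.2.1)]
  let e := st.2.2 + dy
  if dx ≤ 2 * e then (blocks, st.2.1 + ystep, e - dx) else (blocks, st.2.1, e)

def get_raycast_blocks (x0 : Int) (y0 : Int) (x1 : Int) (y1 : Int) : List (Int × Int) :=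
  let s : Bool := decide (|x1 - x0| < |y1 - y0|)
  let (x0, y0, x1, y1) := if s then (y0, x0, y1, x1) else (x0, y0, x1, y1)
  let (x0, x1, y0, y1) := if x0 > x1 then (x1, x0, y1, y0) else (x0, x1, y0, y1)
  let dx := x1 - x0
  let dy := |y1 - y0|
  let ystep := if y1 ≠ y0 then PySem.Int.floordiv (y1 - y0) |y1 - y0| else 0
  ((PySem.List.pyRange x0 x1 1).foldl (pvStepA s dx dy ystep) ([], y0, 0)).1

-- ===== PORT B =====
-- B's helper _march: cells along the major axis a, minor coordinate in closed form
def pvMarch (a0 : Int) (b0 : Int) (a1 : Int) (b1 : Int) : List (Int × Int) :=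
  if a0 > a1 then
    (PySem.List.pyRange 0 (a0 - a1) 1).map (fun k =>
      (a1 + k, b1 + ((if b0 > b1 then (1:Int) else 0) - (if b0 < b1 then (1:Int) else 0))
        * PySem.Int.floordiv (2 * k * |b0 - b1| + (a0 - a1)) (2 * (a0 - a1))))
  else
    (PySem.List.pyRange 0 (a1 - a0) 1).map (fun k =>
      (a0 + k, b0 + ((if b1 > b0 then (1:Int) else 0) - (if b1 < b0 then (1:Int) else 0))
        * PySem.Int.floordiv (2 * k * |b1 - b0| + (a1 - a0)) (2 * (a1 - a0))))

def get_raycast_blocks_alt (x0 : Int) (y0 : Int) (x1 : Int) (y1 : Int) : List (Int × Int) :=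
  if |x1 - x0| < |y1 - y0| then
    (pvMarch y0 x0 y1 x1).map (fun p => (p.2, p.1))
  else
    pvMarch x0 y0 x1 y1

-- ===== PRECONDITION & SPEC =====
def Spec_get_raycast_blocks (x0 : Int) (y0 : Int) (x1 : Int) (y1 : Int) (out : List (Int × Int)) : Prop := out = get_raycast_blocks_alt x0 y0 x1 y1
instance (x0 : Int) (y0 : Int) (x1 : Int) (y1 : Int) (out : List (Int × Int)) : Decidable (Spec_get_raycast_blocks x0 y0 x1 y1 out) := by unfold Spec_get_raycast_blocks; infer_instance

-- ===== CLAIM (what is proved, stated in full; the proofs are below) =====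
def Claim_equal_get_raycast_blocks : Prop := ∀ (x0 : Int) (y0 : Int) (x1 : Int) (y1 : Int), Dom_get_raycast_blocks x0 y0 x1 y1 → Spec_get_raycast_blocks x0 y0 x1 y1 (get_raycast_blocks x0 y0 x1 y1)

-- ===== LEMMAS AND PROOFS =====

-- the closed-form step count after k iterations
def pvQ (dx dy k : Int) : Int := PySem.Int.floordiv (2 * k * dy + dx) (2 * dx)

-- the k-th cell of the normalized line (proof-only abstraction of both loops)
def pvCell (s : Bool) (x0 y0 dx dy ystep k : Int) : Int × Int :=
  let y := y0 + ystep * pvQ dx dy k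
  if s then (y, x0 + k) else (x0 + k, y)

lemma pvQ_zero (dx dy : Int) (hdx : 0 < dx) : pvQ dx dy 0 = 0 := by
  unfold pvQ
  rw [PySem.Int.floordiv_eq_iff_of_pos (by omega)]
  constructor <;> nlinarith

-- A's error-accumulator step agrees with the closed-form count
lemma pvQ_step (dx dy k : Int) (hdx : 0 < dx) (h0 : 0 ≤ dy) (h1 : dy ≤ dx) :
    pvQ dx dy (k + 1)
      = if dx ≤ 2 * ((k * dy - pvQ dx dy k * dx) + dy) then pvQ dx dy k + 1 else pvQ dx dy k := by
  have h2 : (0:Int) < 2 * dx := by omega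
  have ha := (PySem.Int.floordiv_eq_iff_of_pos h2).mp (rfl : PySem.Int.floordiv (2*k*dy + dx) (2*dx) = _)
  have hb := (PySem.Int.floordiv_eq_iff_of_pos h2).mp (rfl : PySem.Int.floordiv (2*(k+1)*dy + dx) (2*dx) = _)
  unfold pvQ at *
  set a := PySem.Int.floordiv (2*k*dy + dx) (2*dx) with hadef
  set b := PySem.Int.floordiv (2*(k+1)*dy + dx) (2*dx) with hbdef
  obtain ⟨ha1, ha2⟩ := ha
  obtain ⟨hb1, hb2⟩ := hb
  split_ifs with hc
  · have hlt : a * dx < b * dx := by nlinarith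
    have hlt2 : b * dx < (a + 2) * dx := by nlinarith
    have := lt_of_mul_lt_mul_right hlt (le_of_lt hdx)
    have := lt_of_mul_lt_mul_right hlt2 (le_of_lt hdx)
    omega
  · have hlt : a * dx < (b + 1) * dx := by nlinarith
    have hlt2 : b * dx < (a + 1) * dx := by nlinarith
    have := lt_of_mul_lt_mul_right hlt (le_of_lt hdx)
    have := lt_of_mul_lt_mul_right hlt2 (le_of_lt hdx)
    omega

-- loop invariant: after n iterations A's state is (first n cells, y0 + ystep*Q n, n*dy - Q n * dx)
lemma pv_loop_inv (s : Bool) (x0 y0 dx dy ystep : Int) (hdx : 0 < dx) (h0 : 0 ≤ dy)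
    (h1 : dy ≤ dx) (n : ℕ) :
    (List.range n).foldl (fun st (k : ℕ) => pvStepA s dx dy ystep st (x0 + (k : Int))) ([], y0, 0)
      = ((List.range n).map (fun (k : ℕ) => pvCell s x0 y0 dx dy ystep (k : Int)),
         y0 + ystep * pvQ dx dy n, (n : Int) * dy - pvQ dx dy n * dx) := by
  induction n with
  | zero => simp [pvQ_zero dx dy hdx]
  | succ m ih =>
      rw [List.range_succ, List.foldl_append, List.map_append, ih]
      have hq := pvQ_step dx dy (m : Int) hdx h0 h1
      simp only [List.foldl_cons, List.foldl_nil, pvStepA, pvCell]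
      push_cast
      rw [hq]
      split_ifs with hc <;>
        · simp only [pvQ, List.map_cons, List.map_nil, Prod.mk.injEq]
          and_intros <;> first | trivial | ring

-- A's normalized loop produces exactly the cells
lemma pv_core (s : Bool) (x0 x1 y0 dy ystep : Int) (h0 : 0 ≤ dy) (h1 : dy ≤ x1 - x0) :
    ((PySem.List.pyRange x0 x1 1).foldl (pvStepA s (x1 - x0) dy ystep) ([], y0, 0)).1
      = (PySem.List.pyRange 0 (x1 - x0) 1).map (pvCell s x0 y0 (x1 - x0) dy ystep) := by
  by_cases hdx : x1 - x0 ≤ 0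
  · rw [PySem.List.pyRange_one_eq_nil (by omega), PySem.List.pyRange_one_eq_nil (by omega)]
    rfl
  · push_neg at hdx
    rw [PySem.List.pyRange_one x0 x1, PySem.List.pyRange_one 0 (x1 - x0)]
    rw [List.foldl_map]
    have hn : (x1 - x0 - 0).toNat = (x1 - x0).toNat := by omega
    rw [hn, List.map_map]
    rw [pv_loop_inv s x0 y0 (x1 - x0) dy ystep hdx h0 h1 ((x1 - x0).toNat)]
    simp [Function.comp_def]

-- A's ystep expression equals B's comparison-difference sign
lemma pv_sign (a b : Int) :
    (if b ≠ a then PySem.Int.floordiv (b - a) |b - a| else 0)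
      = (if b > a then (1:Int) else 0) - (if b < a then (1:Int) else 0) := by
  rcases lt_trichotomy a b with h | h | h
  · rw [if_pos (show b ≠ a by omega), abs_of_pos (show (0:Int) < b - a by omega),
      show PySem.Int.floordiv (b - a) (b - a) = 1 by
        rw [PySem.Int.floordiv_eq_iff_of_pos (by omega)]; constructor <;> nlinarith,
      if_pos h, if_neg (show ¬ b < a by omega)]
    norm_num
  · simp [h]
  · rw [if_pos (show b ≠ a by omega), abs_of_neg (show b - a < 0 by omega),
      show PySem.Int.floordiv (b - a) (-(b - a)) = -1 by
        rw [PySem.Int.floordiv_eq_iff_of_pos (by omega)]; constructor <;> nlinarith,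
      if_neg (show ¬ b > a by omega), if_pos h]
    norm_num

-- the mapped cells match B's steep branch (march then flip)
lemma pv_steep (a0 b0 da db sb : Int) :
    List.map (pvCell true a0 b0 da db sb) (PySem.List.pyRange 0 da 1)
      = List.map (fun p : Int × Int => (p.2, p.1))
          (List.map (fun k => (a0 + k, b0 + sb * PySem.Int.floordiv (2 * k * db + da) (2 * da)))
            (PySem.List.pyRange 0 da 1)) := by
  rw [List.map_map]; simp [pvCell, pvQ, Function.comp_def]

-- the mapped cells match B's shallow branch
lemma pv_shallow (a0 b0 da db sb : Int) :
    List.map (pvCell false a0 b0 da db sb) (PySem.List.pyRange 0 da 1)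
      = List.map (fun k => (a0 + k, b0 + sb * PySem.Int.floordiv (2 * k * db + da) (2 * da)))
        (PySem.List.pyRange 0 da 1) := by
  simp [pvCell, pvQ]

-- ===== VERDICT (by name: the statement is the Claim_ definition above) =====
theorem get_raycast_blocks_spec : Claim_equal_get_raycast_blocks := by
  intro x0 y0 x1 y1 _
  unfold Spec_get_raycast_blocks get_raycast_blocks get_raycast_blocks_alt pvMarch
  by_cases hs : |x1 - x0| < |y1 - y0| <;>
    simp only [hs, decide_true, decide_false, Bool.false_eq_true, if_true, if_false, gt_iff_lt]
  · by_cases hx : y1 < y0 <;>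
      simp only [hx, if_true, if_false] <;>
      rw [pv_sign, pv_core _ _ _ _ _ _ (abs_nonneg _)
            (by simp only [Int.abs_eq_natAbs] at *; omega)] <;>
      exact pv_steep _ _ _ _ _
  · by_cases hx : x1 < x0 <;>
      simp only [hx, if_true, if_false] <;>
      rw [pv_sign, pv_core _ _ _ _ _ _ (abs_nonneg _)
            (by simp only [Int.abs_eq_natAbs] at *; omega)] <;>
      exact pv_shallow _ _ _ _ _
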